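-- pv_equiv track=rewrite | github.com/duyanh221204/Python-PTIT | ICPC0107 - Thay đổi chữ số.py | tt1
-- ===== SOURCE A (Python) =====
-- def tt1(a, p, q):
--     s = 0
--     for i in a:
--         if ord(i) - 48 == q:
--             s = s * 10 + p
--         else:
--             s = s * 10 + ord(i) - 48
--     return s
-- ===== SOURCE B (Python) =====
-- def tt1(a, p, q):
--     vals = [p if ord(c) - 48 == q else ord(c) - 48 for c in a]
--     n = len(vals)
--     return sum(v * 10 ** (n - 1 - i) for i, v in enumerate(vals))
-- ===== Notes on version B (the rewrite author's own statement) =====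
-- stated objective: alternative
-- what changed: Replaces Horner's running accumulator (s = s*10 + digit per character) with two passes: a comprehension building the per-position integer values, then a positional-weighted sum v * 10**(n-1-i) over enumerate.
import Mathlib
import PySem

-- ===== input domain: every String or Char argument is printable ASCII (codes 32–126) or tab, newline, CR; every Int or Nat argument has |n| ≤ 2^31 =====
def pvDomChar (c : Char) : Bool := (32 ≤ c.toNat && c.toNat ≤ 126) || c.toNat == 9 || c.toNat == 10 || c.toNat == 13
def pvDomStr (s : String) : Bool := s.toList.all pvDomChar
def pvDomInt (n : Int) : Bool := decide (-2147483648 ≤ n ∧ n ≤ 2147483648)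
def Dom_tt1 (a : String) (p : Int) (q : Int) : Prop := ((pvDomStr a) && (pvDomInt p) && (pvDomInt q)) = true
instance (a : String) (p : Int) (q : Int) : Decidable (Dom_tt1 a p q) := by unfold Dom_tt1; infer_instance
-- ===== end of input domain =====

-- B replaces A's Horner accumulator with a per-position value list plus an explicit
-- positional-weighted sum (same cost, different decomposition).

-- ===== PORT A =====
def tt1 (a : String) (p : Int) (q : Int) : Int :=
  a.toList.foldl (fun s i =>
    if (i.toNat : Int) - 48 = q then s * 10 + p
    else s * 10 + ((i.toNat : Int) - 48)) 0

-- ===== PORT B =====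
def tt1_alt (a : String) (p : Int) (q : Int) : Int :=
  let vals : List Int :=
    a.toList.map (fun c => if (c.toNat : Int) - 48 = q then p else (c.toNat : Int) - 48)
  let n : Int := vals.length
  ((PySem.List.enumerate vals 0).map (fun iv => iv.2 * 10 ^ (n - 1 - iv.1).toNat)).sum

-- ===== PRECONDITION & SPEC =====
def Spec_tt1 (a : String) (p : Int) (q : Int) (out : Int) : Prop := out = tt1_alt a p q
instance (a : String) (p : Int) (q : Int) (out : Int) : Decidable (Spec_tt1 a p q out) := by unfold Spec_tt1; infer_instance

-- ===== CLAIM (what is proved, stated in full; the proofs are below) =====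
def Claim_equal_tt1 : Prop := ∀ (a : String) (p : Int) (q : Int), Dom_tt1 a p q → Spec_tt1 a p q (tt1 a p q)

-- ===== LEMMAS AND PROOFS =====

-- weighted sum over enumerate: shifting the start offset and n together is invariant
theorem wsum_shift (l : List Int) (s₀ n : Int) :
    ((PySem.List.enumerate l (s₀ + 1)).map (fun iv => iv.2 * 10 ^ (n + 1 - 1 - iv.1).toNat)).sum
  = ((PySem.List.enumerate l s₀).map (fun iv => iv.2 * 10 ^ (n - 1 - iv.1).toNat)).sum := by
  induction l generalizing s₀ with
  | nil => simp [PySem.List.enumerate_nil]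
  | cons v t ih =>
    simp only [PySem.List.enumerate_cons, List.map_cons, List.sum_cons]
    rw [ih (s₀ + 1)]
    have he : (n + 1 - 1 - (s₀ + 1)).toNat = (n - 1 - s₀).toNat := by omega
    rw [he]

-- Horner's fold equals the positional-weighted sum (accumulator generalized)
theorem horner_eq_wsum (l : List Int) (s : Int) :
    l.foldl (fun s v => s * 10 + v) s
  = s * 10 ^ l.length
    + ((PySem.List.enumerate l 0).map (fun iv => iv.2 * 10 ^ ((l.length : Int) - 1 - iv.1).toNat)).sum := by
  induction l generalizing s with
  | nil => simp
  | cons v t ih =>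
    simp only [List.foldl_cons, List.length_cons, PySem.List.enumerate_cons, List.map_cons,
      List.sum_cons]
    rw [ih (s * 10 + v)]
    have h1 : ((t.length : Int) + 1 - 1 - 0).toNat = t.length := by omega
    have h2 : ((PySem.List.enumerate t (0 + 1)).map
        (fun iv => iv.2 * 10 ^ (((t.length : Int) + 1) - 1 - iv.1).toNat)).sum
      = ((PySem.List.enumerate t 0).map
        (fun iv => iv.2 * 10 ^ ((t.length : Int) - 1 - iv.1).toNat)).sum :=
      wsum_shift t 0 (t.length : Int)
    push_cast
    push_cast at h2
    rw [h2, h1]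
    simp [pow_succ]
    ring

-- ===== VERDICT (by name: the statement is the Claim_ definition above) =====
theorem tt1_spec : Claim_equal_tt1 := by
  intro a p q _
  unfold Spec_tt1 tt1 tt1_alt
  have hmap : a.toList.foldl (fun s i =>
      if (i.toNat : Int) - 48 = q then s * 10 + p
      else s * 10 + ((i.toNat : Int) - 48)) 0
    = (a.toList.map (fun c => if (c.toNat : Int) - 48 = q then p else (c.toNat : Int) - 48)).foldl
        (fun s v => s * 10 + v) 0 := by
    rw [List.foldl_map]
    apply PySem.List.foldl_congr_mem
    intro acc x _
    split_ifs <;> rfl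
  rw [hmap, horner_eq_wsum]
  simp [List.length_map]
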